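-- pv_equiv track=rewrite | github.com/Jhanviudani/RIDC-Project | mainapp.py | find_best_text_for_program
-- ===== SOURCE A (Python) =====
-- import math
--
-- def norm(s: str) -> str:
--     if s is None or (isinstance(s, float) and math.isnan(s)):
--         return ""
--     return str(s).strip()
--
-- def find_best_text_for_program(text_index, program_name, org_name):
--     """Heuristic filename match against program and organization names."""
--     pn = norm(program_name).lower()
--     on = norm(org_name).lower()
--     if not text_index:
--         return None
--     # prefer program name; then organization
--     for needle in [pn, on]:
--         if not needle:
--             continue
--         # pick first that contains the needle in basename
--         for (path, text, base) in text_index: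
--             if needle and needle in base:
--                 return text
--     # fallback: None
--     return None
-- ===== SOURCE B (Python) =====
-- import math
--
-- def norm(s: str) -> str:
--     if s is None or (isinstance(s, float) and math.isnan(s)):
--         return ""
--     return str(s).strip()
--
-- def find_best_text_for_program(text_index, program_name, org_name):
--     """Single pass: return first program-name match immediately; remember first org match."""
--     pn = norm(program_name).lower()
--     on = norm(org_name).lower()
--     if not text_index:
--         return None
--     org_match = None
--     for (path, text, base) in text_index:
--         if pn and pn in base:
--             return text
--         if on and on in base and org_match is None:
--             org_match = text
--     return org_match
-- ===== Notes on version B (the rewrite author's own statement) =====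
-- stated objective: alternative
-- what changed: Replaced A's two sequential scans of text_index (one per needle) by a single pass that returns immediately on a program-name match and records the first org-name match in an accumulator.
import Mathlib
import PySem

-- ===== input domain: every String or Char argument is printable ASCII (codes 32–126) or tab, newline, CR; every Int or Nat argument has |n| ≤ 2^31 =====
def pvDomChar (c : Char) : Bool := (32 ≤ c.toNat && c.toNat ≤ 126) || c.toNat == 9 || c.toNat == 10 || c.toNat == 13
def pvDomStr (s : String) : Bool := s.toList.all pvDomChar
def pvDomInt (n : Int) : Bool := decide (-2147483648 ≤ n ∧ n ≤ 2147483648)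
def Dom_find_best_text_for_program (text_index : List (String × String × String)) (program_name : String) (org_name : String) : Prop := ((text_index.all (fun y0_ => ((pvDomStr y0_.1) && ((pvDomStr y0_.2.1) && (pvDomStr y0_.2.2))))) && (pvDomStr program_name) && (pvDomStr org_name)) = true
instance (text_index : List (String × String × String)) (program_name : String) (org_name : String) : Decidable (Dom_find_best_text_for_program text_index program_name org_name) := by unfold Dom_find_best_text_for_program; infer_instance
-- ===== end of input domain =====

-- B replaces A's two sequential scans of text_index by one pass with an org-match
-- accumulator; equivalence of the return values is proved on all inputs (A is total).
-- ===== PORT A =====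
-- inner 'for (path, text, base) in text_index: if needle and needle in base: return text'
def pvA_scan (needle : String) : List (String × String × String) → Option String
  | [] => none
  | (_, text, base) :: rest =>
      if needle ≠ "" ∧ PySem.Str.isIn needle base then some text else pvA_scan needle rest

-- outer 'for needle in [pn, on]' with the 'if not needle: continue' guard
def pvA_needles (ti : List (String × String × String)) : List String → Option String
  | [] => none
  | n :: rest =>
      if n = "" then pvA_needles ti rest
      else match pvA_scan n ti with
        | some t => some t
        | none => pvA_needles ti rest

def find_best_text_for_program (text_index : List (String × String × String)) (program_name : String) (org_name : String) : Option String :=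
  let pn := PySem.Str.lower (PySem.Str.strip program_name)
  let on := PySem.Str.lower (PySem.Str.strip org_name)
  if text_index = [] then none
  else pvA_needles text_index [pn, on]

-- ===== PORT B =====
-- single pass: return on a program match, record the first org match in org_match
def pvB_go (pn on : String) (org_match : Option String) : List (String × String × String) → Option String
  | [] => org_match
  | (_, text, base) :: rest =>
      if pn ≠ "" ∧ PySem.Str.isIn pn base then some text
      else if on ≠ "" ∧ PySem.Str.isIn on base ∧ org_match = none then pvB_go pn on (some text) rest
      else pvB_go pn on org_match rest

def find_best_text_for_program_alt (text_index : List (String × String × String)) (program_name : String) (org_name : String) : Option String :=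
  let pn := PySem.Str.lower (PySem.Str.strip program_name)
  let on := PySem.Str.lower (PySem.Str.strip org_name)
  if text_index = [] then none
  else pvB_go pn on none text_index

-- ===== PRECONDITION & SPEC =====
def Spec_find_best_text_for_program (text_index : List (String × String × String)) (program_name : String) (org_name : String) (out : Option String) : Prop := out = find_best_text_for_program_alt text_index program_name org_name
instance (text_index : List (String × String × String)) (program_name : String) (org_name : String) (out : Option String) : Decidable (Spec_find_best_text_for_program text_index program_name org_name out) := by unfold Spec_find_best_text_for_program; infer_instance

-- ===== CLAIM (what is proved, stated in full; the proofs are below) =====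
def Claim_equal_find_best_text_for_program : Prop := ∀ (text_index : List (String × String × String)) (program_name : String) (org_name : String), Dom_find_best_text_for_program text_index program_name org_name → Spec_find_best_text_for_program text_index program_name org_name (find_best_text_for_program text_index program_name org_name)

-- ===== LEMMAS AND PROOFS =====

-- one-pass/two-pass correspondence, generalized over the accumulator
theorem pvB_go_eq (pn on : String) (acc : Option String) (ti : List (String × String × String)) :
    pvB_go pn on acc ti =
      match (if pn = "" then none else pvA_scan pn ti) with
      | some t => some t
      | none => match acc with
        | some t => some t
        | none => if on = "" then none else pvA_scan on ti := by
  induction ti generalizing acc with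
  | nil =>
    cases acc <;> simp only [pvB_go, pvA_scan] <;> split_ifs <;> rfl
  | cons hd tl ih =>
    obtain ⟨p, t, b⟩ := hd
    simp only [pvB_go, pvA_scan]
    by_cases hpn : pn ≠ "" ∧ PySem.Str.isIn pn b
    · rw [if_pos hpn, if_neg hpn.1, if_pos hpn]
    · rw [if_neg hpn]
      by_cases hc : on ≠ "" ∧ PySem.Str.isIn on b ∧ acc = none
      · rw [if_pos hc, ih]
        obtain ⟨h1, h2, rfl⟩ := hc
        simp only [if_neg h1, if_pos (⟨h1, h2⟩ : on ≠ "" ∧ PySem.Str.isIn on b)]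
        by_cases hp : pn = ""
        · simp only [if_pos hp]
        · simp only [if_neg hp, if_neg hpn]
      · rw [if_neg hc, ih]
        have hpn_eq : (if pn = "" then none
            else if pn ≠ "" ∧ PySem.Str.isIn pn b then some t else pvA_scan pn tl) =
            (if pn = "" then none else pvA_scan pn tl) := by
          by_cases hp : pn = ""
          · simp only [if_pos hp]
          · simp only [if_neg hp, if_neg hpn]
        rw [hpn_eq]
        cases pvA_scan pn tl <;> cases hps : (if pn = "" then none else pvA_scan pn tl) <;>
          try rfl
        all_goals cases acc with
        | some t' => rfl
        | none =>
          by_cases ho : on = ""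
          · simp only [if_pos ho]
          · have hin : ¬ (on ≠ "" ∧ PySem.Str.isIn on b) := by
              intro hx; exact hc ⟨hx.1, hx.2, rfl⟩
            simp only [if_neg ho, if_neg hin]

-- A's two-pass result equals B's one-pass result, for any needles
theorem pv_main_aux (pn on : String) (ti : List (String × String × String)) :
    pvA_needles ti [pn, on] = pvB_go pn on none ti := by
  rw [pvB_go_eq]
  simp only [pvA_needles]
  by_cases hp : pn = ""
  · simp only [if_pos hp]
    by_cases ho : on = ""
    · simp only [if_pos ho]
    · simp only [if_neg ho]
      cases pvA_scan on ti <;> rfl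
  · simp only [if_neg hp]
    cases pvA_scan pn ti with
    | some t => rfl
    | none =>
      by_cases ho : on = ""
      · simp only [if_pos ho]
      · simp only [if_neg ho]
        cases pvA_scan on ti <;> rfl

-- ===== VERDICT (by name: the statement is the Claim_ definition above) =====
theorem find_best_text_for_program_spec : Claim_equal_find_best_text_for_program := by
  intro ti p o _
  unfold Spec_find_best_text_for_program find_best_text_for_program find_best_text_for_program_alt
  simp only [pv_main_aux]
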